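-- pv_equiv track=rewrite | github.com/inveniosoftware/invenio | invenio/utils/mail.py | email_quote_txt
-- ===== SOURCE A (Python) =====
-- def email_quote_txt(text,
--                     indent_txt='>>',
--                     linebreak_input="\n",
--                     linebreak_output="\n"):
--     """
--     Takes a text and returns it in a typical mail quoted format, e.g.::
--         C'est un lapin, lapin de bois.
--         >>Quoi?
--         Un cadeau.
--         >>What?
--         A present.
--         >>Oh, un cadeau.
--
--     will return::
--         >>C'est un lapin, lapin de bois.
--         >>>>Quoi?
--         >>Un cadeau.
--         >>>>What?
--         >>A present.
--         >>>>Oh, un cadeau.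
--
--     @param text: the string to quote
--     @param indent_txt: the string used for quoting (default: '>>')
--     @param linebreak_input: in the text param, string used for linebreaks
--     @param linebreak_output: linebreak used for output
--     @return: the text as a quoted string
--     """
--     if (text == ""):
--         return ""
--     lines = text.split(linebreak_input)
--     text = ""
--     for line in lines:
--         text += indent_txt + line + linebreak_output
--     return text
-- ===== SOURCE B (Python) =====
-- def email_quote_txt(text,
--                     indent_txt='>>',
--                     linebreak_input="\n",
--                     linebreak_output="\n"):
--     if text == "":
--         return ""
--     out = [indent_txt]
--     i, n, m = 0, len(text), len(linebreak_input)
--     while i < n: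
--         if m != 0 and text.startswith(linebreak_input, i):
--             out.append(linebreak_output)
--             out.append(indent_txt)
--             i += m
--         else:
--             out.append(text[i])
--             i += 1
--     out.append(linebreak_output)
--     return "".join(out)
-- ===== Notes on version B (the rewrite author's own statement) =====
-- stated objective: alternative
-- what changed: Replaces A's split-into-lines-then-accumulate loop by a single left-to-right scanner over the characters that copies characters and rewrites each occurrence of linebreak_input into linebreak_output+indent in place, so no line list is ever built.
import Mathlib
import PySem

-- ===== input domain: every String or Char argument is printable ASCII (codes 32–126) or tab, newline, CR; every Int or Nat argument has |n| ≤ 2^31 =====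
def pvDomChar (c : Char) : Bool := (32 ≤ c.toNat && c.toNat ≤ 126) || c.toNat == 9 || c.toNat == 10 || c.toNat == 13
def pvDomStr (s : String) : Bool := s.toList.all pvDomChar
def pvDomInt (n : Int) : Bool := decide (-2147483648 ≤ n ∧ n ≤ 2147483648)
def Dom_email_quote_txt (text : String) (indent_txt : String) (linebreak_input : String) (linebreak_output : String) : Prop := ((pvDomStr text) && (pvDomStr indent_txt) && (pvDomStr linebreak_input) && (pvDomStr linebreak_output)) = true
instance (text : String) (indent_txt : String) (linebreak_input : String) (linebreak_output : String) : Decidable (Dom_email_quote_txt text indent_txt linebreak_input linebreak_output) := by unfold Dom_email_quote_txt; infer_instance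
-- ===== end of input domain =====

-- B replaces A's split-then-accumulate loop by a single character scanner that rewrites linebreaks in place (alternative decomposition, same cost).

-- ===== PORT A =====
def email_quote_txt (text : String) (indent_txt : String) (linebreak_input : String) (linebreak_output : String) : String :=
  if text == "" then ""
  else
    match PySem.Str.split? text linebreak_input with
    | none => ""   -- Python raises ValueError here (empty separator); excluded by Pre_
    | some lines => lines.foldl (fun acc line => acc ++ indent_txt ++ line ++ linebreak_output) ""

-- ===== PORT B =====
-- Source B's while loop: scan the remaining characters, out-accumulator holds the pieces joined so far
def pvScanGo (ind lbi lbo : List Char) : List Char → List Char → List Char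
  | [], acc => acc
  | c :: t, acc =>
    if h : lbi ≠ [] ∧ lbi.isPrefixOf (c :: t) then
      pvScanGo ind lbi lbo (List.drop lbi.length (c :: t)) (acc ++ lbo ++ ind)
    else
      pvScanGo ind lbi lbo t (acc ++ [c])
termination_by l _ => l.length
decreasing_by
  · have h1 : 1 ≤ lbi.length := by
      cases lbi with
      | nil => exact absurd rfl h.1
      | cons _ _ => simp
    simp only [List.length_drop, List.length_cons]
    omega
  · simp

def email_quote_txt_alt (text : String) (indent_txt : String) (linebreak_input : String) (linebreak_output : String) : String :=
  if text == "" then ""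
  else String.mk (pvScanGo indent_txt.toList linebreak_input.toList linebreak_output.toList
                    text.toList indent_txt.toList ++ linebreak_output.toList)

-- ===== PRECONDITION & SPEC =====
-- A raises ValueError (str.split with empty separator) when text ≠ "" and linebreak_input = ""; those inputs are excluded.
def Pre_email_quote_txt (text : String) (indent_txt : String) (linebreak_input : String) (linebreak_output : String) : Prop :=
  text = "" ∨ linebreak_input ≠ ""
instance (text : String) (indent_txt : String) (linebreak_input : String) (linebreak_output : String) : Decidable (Pre_email_quote_txt text indent_txt linebreak_input linebreak_output) := by unfold Pre_email_quote_txt; infer_instance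
def pvWitness_email_quote_txt : String × String × String × String := ("a\nb", ">>", "\n", "\n")

def Spec_email_quote_txt (text : String) (indent_txt : String) (linebreak_input : String) (linebreak_output : String) (out : String) : Prop := out = email_quote_txt_alt text indent_txt linebreak_input linebreak_output
instance (text : String) (indent_txt : String) (linebreak_input : String) (linebreak_output : String) (out : String) : Decidable (Spec_email_quote_txt text indent_txt linebreak_input linebreak_output out) := by unfold Spec_email_quote_txt; infer_instance

-- ===== CLAIM (what is proved, stated in full; the proofs are below) =====
def Claim_equal_email_quote_txt : Prop := ∀ (text : String) (indent_txt : String) (linebreak_input : String) (linebreak_output : String), Dom_email_quote_txt text indent_txt linebreak_input linebreak_output → Pre_email_quote_txt text indent_txt linebreak_input linebreak_output → Spec_email_quote_txt text indent_txt linebreak_input linebreak_output (email_quote_txt text indent_txt linebreak_input linebreak_output)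

-- ===== LEMMAS AND PROOFS =====

-- fuel-indexed, accumulator-free versions of PySem.Chars.replace.go and splitOn.go
def pvRf (old new : List Char) : Nat → List Char → List Char
  | 0, l => l
  | _ + 1, [] => []
  | fuel + 1, c :: t =>
    if old.isPrefixOf (c :: t) then new ++ pvRf old new fuel (List.drop old.length (c :: t))
    else c :: pvRf old new fuel t

def pvConsHead (x : List Char) : List (List Char) → List (List Char)
  | [] => [x]
  | p :: ps => (x ++ p) :: ps

def pvSpl (sep : List Char) : Nat → List Char → List (List Char)
  | 0, l => [l]
  | _ + 1, [] => [[]]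
  | fuel + 1, c :: t =>
    if sep.isPrefixOf (c :: t) then [] :: pvSpl sep fuel (List.drop sep.length (c :: t))
    else pvConsHead [c] (pvSpl sep fuel t)

lemma pvSpl_ne_nil (sep : List Char) (fuel : Nat) (l : List Char) : pvSpl sep fuel l ≠ [] := by
  match fuel, l with
  | 0, l => simp [pvSpl]
  | _ + 1, [] => simp [pvSpl]
  | fuel + 1, c :: t =>
    simp only [pvSpl]
    split
    · simp
    · cases h : pvSpl sep fuel t <;> simp [pvConsHead]

lemma pvReplace_go_eq (old new : List Char) (fuel : Nat) :
    ∀ (l acc : List Char), PySem.Chars.replace.go old new fuel l acc = acc.reverse ++ pvRf old new fuel l := by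
  induction fuel with
  | zero => intro l acc; simp [PySem.Chars.replace.go, pvRf]
  | succ f ih =>
    intro l acc
    cases l with
    | nil => simp [PySem.Chars.replace.go, pvRf]
    | cons c t =>
      simp only [PySem.Chars.replace.go, pvRf]
      split
      · rw [ih]; simp
      · rw [ih]; simp

lemma pvSplitOn_go_eq (sep : List Char) (fuel : Nat) :
    ∀ (l cur : List Char) (acc : List (List Char)),
      PySem.Chars.splitOn.go sep fuel l cur acc = acc.reverse ++ pvConsHead cur.reverse (pvSpl sep fuel l) := by
  induction fuel with
  | zero => intro l cur acc; simp [PySem.Chars.splitOn.go, pvSpl, pvConsHead]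
  | succ f ih =>
    intro l cur acc
    cases l with
    | nil => simp [PySem.Chars.splitOn.go, pvSpl, pvConsHead]
    | cons c t =>
      simp only [PySem.Chars.splitOn.go, pvSpl]
      split
      · rw [ih]
        cases h : pvSpl sep f (List.drop sep.length (c :: t)) with
        | nil => exact absurd h (pvSpl_ne_nil _ _ _)
        | cons p ps => simp [pvConsHead]
      · rw [ih]
        cases h : pvSpl sep f t with
        | nil => exact absurd h (pvSpl_ne_nil _ _ _)
        | cons p ps => simp [pvConsHead]

lemma pvIntercalate_cons_cons (sep a b : List Char) (l : List (List Char)) :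
    sep.intercalate (a :: b :: l) = a ++ sep ++ sep.intercalate (b :: l) := by
  simp [List.intercalate, List.intersperse]

lemma pvIntercalate_consHead (new x : List Char) (ps : List (List Char)) (h : ps ≠ []) :
    new.intercalate (pvConsHead x ps) = x ++ new.intercalate ps := by
  cases ps with
  | nil => exact absurd rfl h
  | cons p ps' =>
    cases ps' with
    | nil => simp [pvConsHead, List.intercalate]
    | cons q qs =>
      simp only [pvConsHead]
      rw [pvIntercalate_cons_cons, pvIntercalate_cons_cons]
      simp [List.append_assoc]

lemma pvIntercalate_spl (sep new : List Char) (hsep : sep ≠ []) (fuel : Nat) :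
    ∀ l : List Char, l.length ≤ fuel → new.intercalate (pvSpl sep (fuel + 1) l) = pvRf sep new fuel l := by
  induction fuel with
  | zero =>
    intro l hl
    have : l = [] := List.length_eq_zero_iff.mp (Nat.le_zero.mp hl)
    subst this; simp [pvSpl, pvRf, List.intercalate]
  | succ f ih =>
    intro l hl
    cases l with
    | nil => simp [pvSpl, pvRf, List.intercalate]
    | cons c t =>
      simp only [pvSpl, pvRf]
      split
      · rename_i hpre
        have hlen : 1 ≤ sep.length := by
          cases sep with
          | nil => exact absurd rfl hsep
          | cons _ _ => simp
        have hd : (List.drop sep.length (c :: t)).length ≤ f := by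
          simp only [List.length_drop]
          simp only [List.length_cons] at hl ⊢
          omega
        cases h : pvSpl sep (f + 1) (List.drop sep.length (c :: t)) with
        | nil => exact absurd h (pvSpl_ne_nil _ _ _)
        | cons p ps =>
          rw [pvIntercalate_cons_cons, ← h, ih _ hd]
          simp
      · have ht : t.length ≤ f := by simp only [List.length_cons] at hl; omega
        rw [pvIntercalate_consHead new [c] _ (pvSpl_ne_nil _ _ _), ih t ht]
        simp

-- A's per-line flatMap equals the intercalate form, for the (always nonempty) split result
lemma pvFlatMap_eq_intercalate (ind lbo : List Char) :
    ∀ (p : List Char) (ps : List (List Char)),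
      List.flatMap (fun line => ind ++ line ++ lbo) (p :: ps)
        = ind ++ (lbo ++ ind).intercalate (p :: ps) ++ lbo := by
  intro p ps
  induction ps generalizing p with
  | nil => simp [List.intercalate]
  | cons q qs ih =>
    rw [List.flatMap_cons, ih q, pvIntercalate_cons_cons]
    simp

lemma pvReplace_eq_intercalate (s sep new : List Char) (hsep : sep ≠ []) :
    PySem.Chars.replace s sep new = new.intercalate (PySem.Chars.splitOn s sep) := by
  rw [PySem.Chars.replace, PySem.Chars.splitOn]
  simp only [List.isEmpty_iff, hsep, if_false]
  rw [pvReplace_go_eq, pvSplitOn_go_eq]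
  simp only [List.reverse_nil, List.nil_append]
  cases h : pvSpl sep (s.length + 1) s with
  | nil => exact absurd h (pvSpl_ne_nil _ _ _)
  | cons p ps =>
    have := pvIntercalate_spl sep new hsep s.length s (le_refl _)
    rw [h] at this
    rw [show pvConsHead [] (p :: ps) = p :: ps by simp [pvConsHead]]
    rw [this]

-- B's scanner, unrolled against the fuel-indexed rewriter
lemma pvScanGo_eq_rf (ind lbi lbo : List Char) (hsep : lbi ≠ []) (fuel : Nat) :
    ∀ (l acc : List Char), l.length ≤ fuel →
      pvScanGo ind lbi lbo l acc = acc ++ pvRf lbi (lbo ++ ind) fuel l := by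
  induction fuel with
  | zero =>
    intro l acc hl
    have : l = [] := List.length_eq_zero_iff.mp (Nat.le_zero.mp hl)
    subst this; simp [pvScanGo, pvRf]
  | succ f ih =>
    intro l acc hl
    cases l with
    | nil => simp [pvScanGo, pvRf]
    | cons c t =>
      rw [pvScanGo, pvRf]
      split
      · rename_i h
        have h1 : 1 ≤ lbi.length := by
          cases lbi with
          | nil => exact absurd rfl hsep
          | cons _ _ => simp
        have hd : (List.drop lbi.length (c :: t)).length ≤ f := by
          simp only [List.length_drop, List.length_cons] at *
          omega
        rw [if_pos h.2, ih _ _ hd]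
        simp
      · rename_i h
        have hnp : ¬ lbi.isPrefixOf (c :: t) := by
          intro hp; exact h ⟨hsep, hp⟩
        have ht : t.length ≤ f := by simp only [List.length_cons] at hl; omega
        rw [if_neg hnp, ih _ _ ht]
        simp

-- B's scanner equals indent-once + replace + trailing linebreak (at the toList level)
lemma pvScanGo_eq_replace (ind lbi lbo s : List Char) (hsep : lbi ≠ []) :
    pvScanGo ind lbi lbo s ind = ind ++ PySem.Chars.replace s lbi (lbo ++ ind) := by
  rw [PySem.Chars.replace]
  simp only [List.isEmpty_iff, hsep, if_false]
  rw [pvReplace_go_eq]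
  simp only [List.reverse_nil, List.nil_append]
  exact pvScanGo_eq_rf ind lbi lbo hsep s.length s ind (le_refl _)

-- the split result is never the empty list
lemma pvSplitOn_ne_nil (s sep : List Char) : PySem.Chars.splitOn s sep ≠ [] := by
  rw [PySem.Chars.splitOn, pvSplitOn_go_eq]
  cases h : pvSpl sep (s.length + 1) s with
  | nil => exact absurd h (pvSpl_ne_nil _ _ _)
  | cons p ps => simp [pvConsHead]

-- toList of A's string fold
lemma pvFoldl_toList (ind lbo : String) :
    ∀ (lines : List String) (acc : String),
      (lines.foldl (fun acc line => acc ++ ind ++ line ++ lbo) acc).toList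
        = (lines.map String.toList).foldl (fun acc line => acc ++ ind.toList ++ line ++ lbo.toList) acc.toList := by
  intro lines
  induction lines with
  | nil => intro acc; simp
  | cons l ls ih => intro acc; simp [List.foldl_cons, ih]

-- ===== VERDICT (by name: the statement is the Claim_ definition above) =====
theorem email_quote_txt_spec : Claim_equal_email_quote_txt := by
  intro text ind lbi lbo _hdom hpre
  unfold Spec_email_quote_txt email_quote_txt email_quote_txt_alt
  by_cases htext : text = ""
  · simp [htext]
  · have hne : (text == "") = false := by simp [htext]
    rw [hne]
    simp only [Bool.false_eq_true, if_false]
    have hlbi : lbi ≠ "" := by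
      rcases hpre with h | h
      · exact absurd h htext
      · exact h
    have hlbiL : lbi.toList ≠ [] := by
      intro h
      exact hlbi (String.toList_inj.mp (by simp [h]))
    have hsplit : PySem.Chars.split? text.toList lbi.toList = some (PySem.Chars.splitOn text.toList lbi.toList) := by
      rw [PySem.Chars.split?]
      simp [List.isEmpty_iff, hlbiL]
    have hmap := PySem.Str.split?_map text lbi
    rw [hsplit] at hmap
    cases hs : PySem.Str.split? text lbi with
    | none => rw [hs] at hmap; simp at hmap
    | some lines =>
      rw [hs] at hmap
      simp only [Option.map_some, Option.some.injEq] at hmap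
      rw [← String.toList_inj]
      rw [pvFoldl_toList, hmap]
      have hscan : pvScanGo ind.toList lbi.toList lbo.toList text.toList ind.toList
          = ind.toList ++ ((lbo.toList ++ ind.toList)).intercalate (PySem.Chars.splitOn text.toList lbi.toList) := by
        rw [pvScanGo_eq_replace _ _ _ _ hlbiL, pvReplace_eq_intercalate _ _ _ hlbiL]
      cases hparts : PySem.Chars.splitOn text.toList lbi.toList with
      | nil => exact absurd hparts (pvSplitOn_ne_nil _ _)
      | cons p ps =>
        have hfm := pvFlatMap_eq_intercalate ind.toList lbo.toList p ps
        calc List.foldl (fun acc line => acc ++ ind.toList ++ line ++ lbo.toList) [] (p :: ps)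
            = List.flatMap (fun line => ind.toList ++ line ++ lbo.toList) (p :: ps) := by
              have h2 := PySem.List.foldl_append_eq_flatMap (fun line => ind.toList ++ line ++ lbo.toList) (p :: ps) ([] : List Char)
              simp only [List.nil_append, List.append_assoc] at h2
              simp only [List.append_assoc]
              exact h2
          _ = ind.toList ++ ((lbo.toList ++ ind.toList)).intercalate (p :: ps) ++ lbo.toList := by
              rw [hfm]
          _ = (String.mk (pvScanGo ind.toList lbi.toList lbo.toList text.toList ind.toList ++ lbo.toList)).toList := by
              rw [hparts] at hscan
              rw [hscan]
              rw [show ∀ l : List Char, (String.mk l).toList = l from fun l => Eq.symm ((fun {l} {s} => String.ofList_eq.mp) rfl)]
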